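-- pv_equiv track=rewrite | github.com/kim130727/modu_math | src/modu_math/semantic/normalize.py | _reorder_by_profile
-- ===== SOURCE A (Python) =====
-- from typing import Any
--
-- def _reorder_by_profile(data: dict[str, Any], order: list[str]) -> dict[str, Any]:
--     reordered: dict[str, Any] = {}
--     for key in order:
--         if key in data:
--             reordered[key] = data[key]
--     for key, value in data.items():
--         if key not in reordered:
--             reordered[key] = value
--     return reordered
-- ===== SOURCE B (Python) =====
-- def _reorder_by_profile(data, order):
--     pos = {}
--     for i, key in enumerate(order):
--         pos.setdefault(key, i)
--     keys = sorted(data, key=lambda k: pos.get(k, len(order)))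
--     return {k: data[k] for k in keys}
-- ===== Notes on version B (the rewrite author's own statement) =====
-- stated objective: alternative
-- what changed: Instead of two membership-filtering passes (over order, then over data), B builds a first-index position map with setdefault and obtains the output key order by one stable sort of the data keys (non-order keys tie at len(order), so stability keeps their insertion order), then rebuilds the dict from that key list.
import Mathlib
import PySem

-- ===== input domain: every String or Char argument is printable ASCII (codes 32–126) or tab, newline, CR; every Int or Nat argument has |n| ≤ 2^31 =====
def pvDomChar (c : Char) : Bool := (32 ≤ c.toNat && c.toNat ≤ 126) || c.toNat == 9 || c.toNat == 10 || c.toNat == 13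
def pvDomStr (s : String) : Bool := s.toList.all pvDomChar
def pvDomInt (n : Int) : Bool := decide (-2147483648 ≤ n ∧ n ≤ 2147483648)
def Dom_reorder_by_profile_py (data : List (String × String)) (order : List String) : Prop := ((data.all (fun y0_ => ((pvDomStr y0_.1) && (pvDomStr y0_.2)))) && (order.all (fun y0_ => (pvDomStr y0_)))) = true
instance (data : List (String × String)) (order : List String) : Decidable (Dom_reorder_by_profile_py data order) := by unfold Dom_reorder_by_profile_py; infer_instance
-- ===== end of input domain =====

-- B rebuilds the dict from the key list sorted stably by each key's first position in `order`
-- (one sort instead of two membership passes); objective: alternative (same asymptotic cost).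

-- ===== PORT A =====
def reorder_by_profile_py (data : List (String × String)) (order : List String) : List (String × String) :=
  let d : PySem.Dict String String := PySem.Dict.mk data
  let reordered : PySem.Dict String String :=
    order.foldl (fun r key => if d.contains key then r.insert key (d.getD key "") else r)
      PySem.Dict.empty
  let final : PySem.Dict String String :=
    data.foldl (fun r kv => if r.contains kv.1 then r else r.insert kv.1 kv.2) reordered
  final.items

-- ===== PORT B =====
def reorder_by_profile_py_alt (data : List (String × String)) (order : List String) : List (String × String) :=
  let pos : PySem.Dict String Int :=
    (PySem.List.enumerate order).foldl (fun p iv => p.setdefault iv.2 iv.1) PySem.Dict.empty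
  let keys : List String :=
    PySem.List.sorted (data.map Prod.fst) (fun k => pos.getD k (order.length : Int))
  let d : PySem.Dict String String := PySem.Dict.mk data
  (keys.foldl (fun out k => out.insert k (d.getD k ""))
      (PySem.Dict.empty : PySem.Dict String String)).items

-- ===== PRECONDITION & SPEC =====
-- `data` models a Python dict, whose keys are necessarily distinct; Pre_ excludes association
-- lists with duplicate keys, which do not represent any dict the Python function can receive.
def Pre_reorder_by_profile_py (data : List (String × String)) (order : List String) : Prop :=
  (data.map Prod.fst).Nodup
instance (data : List (String × String)) (order : List String) : Decidable (Pre_reorder_by_profile_py data order) := by unfold Pre_reorder_by_profile_py; infer_instance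

def pvWitness_reorder_by_profile_py : (List (String × String)) × List String :=
  ([("a", "1"), ("b", "2"), ("c", "3")], ["c", "a", "x"])

def Spec_reorder_by_profile_py (data : List (String × String)) (order : List String) (out : List (String × String)) : Prop := out = reorder_by_profile_py_alt data order
instance (data : List (String × String)) (order : List String) (out : List (String × String)) : Decidable (Spec_reorder_by_profile_py data order out) := by unfold Spec_reorder_by_profile_py; infer_instance

-- ===== CLAIM (what is proved, stated in full; the proofs are below) =====
def Claim_equal_reorder_by_profile_py : Prop := ∀ (data : List (String × String)) (order : List String), Dom_reorder_by_profile_py data order → Pre_reorder_by_profile_py data order → Spec_reorder_by_profile_py data order (reorder_by_profile_py data order)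

-- ===== LEMMAS AND PROOFS =====

-- the sort key B uses: the first index of k in order, and order.length for keys not in order
def pvRk (order : List String) (k : String) : Int :=
  if k ∈ order then (order.idxOf k : Int) else (order.length : Int)

lemma pos_fold_get? (ord : List String) : ∀ (s : Int) (p0 : PySem.Dict String Int) (k : String),
    ((PySem.List.enumerate ord s).foldl (fun p iv => p.setdefault iv.2 iv.1) p0).get? k =
      (p0.get? k).or (if k ∈ ord then some (s + (ord.idxOf k : Int)) else none) := by
  induction ord with
  | nil => intro s p0 k; simp [PySem.List.enumerate]
  | cons x xs ih =>
    intro s p0 k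
    rw [PySem.List.enumerate_cons]
    simp only [List.foldl_cons]
    rw [ih (s+1)]
    by_cases hk : k = x
    · subst hk
      rw [PySem.Dict.get?_setdefault_self]
      cases hp : p0.get? k with
      | none => simp [Option.or]
      | some v => simp [Option.or]
    · rw [PySem.Dict.get?_setdefault_of_ne p0 s hk]
      by_cases hm : k ∈ xs
      · have : k ∈ x :: xs := by simp [hm]
        simp only [hm, if_true, this, List.idxOf_cons_ne _ (fun h => hk h.symm)]
        push_cast
        ring_nf
      · have : ¬ k ∈ x :: xs := by simp [hk, hm]
        simp [hm, this]

lemma getD_pos (order : List String) (k : String) :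
    ((PySem.List.enumerate order).foldl (fun p iv => p.setdefault iv.2 iv.1)
        (PySem.Dict.empty : PySem.Dict String Int)).getD k (order.length : Int) =
      pvRk order k := by
  rw [PySem.Dict.getD_eq_get?_getD, pos_fold_get?]
  unfold pvRk
  by_cases h : k ∈ order <;> simp [h, Option.or, PySem.Dict.get?_empty]

lemma pvRk_lt {order : List String} {k : String} (h : k ∈ order) :
    pvRk order k < (order.length : Int) := by
  simp [pvRk, h]
  exact_mod_cast List.idxOf_lt_length_of_mem h

lemma pvRk_le (order : List String) (k : String) : pvRk order k ≤ (order.length : Int) := by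
  by_cases h : k ∈ order
  · exact le_of_lt (pvRk_lt h)
  · simp [pvRk, h]

lemma pvRk_not_mem {order : List String} {k : String} (h : k ∉ order) :
    pvRk order k = (order.length : Int) := by simp [pvRk, h]

lemma pvRk_inj {order : List String} {k1 k2 : String} (h1 : k1 ∈ order) (h2 : k2 ∈ order)
    (h : pvRk order k1 = pvRk order k2) : k1 = k2 := by
  simp only [pvRk, h1, h2, if_true, Nat.cast_inj] at h
  have e1 := List.getElem_idxOf (List.idxOf_lt_length_of_mem h1)
  have e2 := List.getElem_idxOf (List.idxOf_lt_length_of_mem h2)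
  rw [← e1, ← e2]
  congr 1

lemma dedup_pairwise_idxOf (ord : List String) :
    (PySem.List.dedup ord).Pairwise (fun a b => ord.idxOf a < ord.idxOf b) := by
  induction ord with
  | nil => simp [PySem.List.dedup]
  | cons x xs ih =>
    rw [PySem.List.dedup_eq_ofList, PySem.Set.ofList_cons]
    have hmem : ∀ y ∈ (PySem.Set.ofList xs).discard x, y ≠ x := fun y hy =>
      ((PySem.Set.mem_discard (PySem.Set.ofList xs) x y).mp hy).2
    constructor
    · intro y hy
      rw [List.idxOf_cons_self, List.idxOf_cons_ne _ (fun h => hmem y hy h.symm)]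
      omega
    · have hsub : ((PySem.Set.ofList xs).discard x).Sublist (PySem.Set.ofList xs) := by
        unfold PySem.Set.discard
        exact List.filter_sublist
      rw [PySem.List.dedup_eq_ofList] at ih
      have hp := List.Pairwise.sublist hsub ih
      refine List.Pairwise.imp_of_mem ?_ hp
      intro a b ha hb hab
      rw [List.idxOf_cons_ne _ (fun h => hmem a ha h.symm),
          List.idxOf_cons_ne _ (fun h => hmem b hb h.symm)]
      omega

lemma dedup_pairwise_rk (order : List String) :
    (PySem.List.dedup order).Pairwise (fun a b => pvRk order a < pvRk order b) := by
  refine List.Pairwise.imp_of_mem ?_ (dedup_pairwise_idxOf order)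
  intro a b ha hb hab
  have ha' := (PySem.List.mem_dedup order a).mp ha
  have hb' := (PySem.List.mem_dedup order b).mp hb
  simp only [pvRk, ha', hb', if_true]
  exact_mod_cast hab

lemma insertBy_append_right {α : Type} (before : α → α → Bool) (x : α) (u v : List α)
    (h : ∀ y ∈ u, before x y = false) :
    PySem.List.insertBy before x (u ++ v) = u ++ PySem.List.insertBy before x v := by
  induction u with
  | nil => simp
  | cons y t ih =>
    have hy : before x y = false := h y (by simp)
    simp [PySem.List.insertBy, hy]
    exact ih (fun z hz => h z (by simp [hz]))

lemma insertBy_eq_cons {α : Type} (before : α → α → Bool) (x : α) (rest : List α)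
    (h : ∀ y, rest.head? = some y → before x y = true) :
    PySem.List.insertBy before x rest = x :: rest := by
  cases rest with
  | nil => rfl
  | cons y t => simp [PySem.List.insertBy, h y rfl]

lemma filter_insert_mid (order : List String) :
    ∀ (l : List String) (xs : List String) (x : String),
      l.Pairwise (fun a b => pvRk order a < pvRk order b) → x ∈ l → x ∉ xs →
      l.filter (fun k => decide (k ∈ xs ++ [x])) =
        (l.filter (fun k => decide (k ∈ xs))).takeWhile (fun k => decide (pvRk order k < pvRk order x))
          ++ x :: (l.filter (fun k => decide (k ∈ xs))).dropWhile (fun k => decide (pvRk order k < pvRk order x)) := by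
  intro l
  induction l with
  | nil => intro xs x _ hx; simp at hx
  | cons y t ih =>
    intro xs x hp hx hxxs
    rw [List.pairwise_cons] at hp
    obtain ⟨hy, hpt⟩ := hp
    by_cases hyx : y = x
    · subst hyx
      -- y = x : x is not in t (ranks strictly above rk x), x ∉ xs
      have hxt : ∀ k ∈ t, k ≠ y := fun k hk h => by
        have := hy k hk; rw [h] at this; omega
      rw [List.filter_cons_of_pos (by simp), List.filter_cons_of_neg (by simp [hxxs])]
      have hft : t.filter (fun k => decide (k ∈ xs ++ [y])) = t.filter (fun k => decide (k ∈ xs)) := by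
        apply List.filter_congr
        intro k hk
        simp [hxt k hk]
      rw [hft]
      have htw : (t.filter (fun k => decide (k ∈ xs))).takeWhile
          (fun k => decide (pvRk order k < pvRk order y)) = [] := by
        rw [List.takeWhile_eq_nil_iff]
        intro hl hph
        rw [List.get_eq_getElem] at hph
        have hmem : (t.filter (fun k => decide (k ∈ xs)))[0] ∈ t :=
          List.mem_of_mem_filter (List.getElem_mem hl)
        have := hy _ hmem
        simp at hph
        omega
      have hdw : (t.filter (fun k => decide (k ∈ xs))).dropWhile
          (fun k => decide (pvRk order k < pvRk order y)) = t.filter (fun k => decide (k ∈ xs)) := by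
        rw [List.dropWhile_eq_self_iff]
        intro hl hph
        have hmem : (t.filter (fun k => decide (k ∈ xs)))[0] ∈ t :=
          List.mem_of_mem_filter (List.getElem_mem hl)
        have := hy _ hmem
        simp at hph
        omega
      rw [htw, hdw]
      simp
    · have hxt : x ∈ t := by cases hx with
        | head => exact absurd rfl hyx
        | tail _ h => exact h
      have hyltx : pvRk order y < pvRk order x := hy x hxt
      by_cases hyxs : y ∈ xs
      · rw [List.filter_cons_of_pos (by simp [hyxs]), List.filter_cons_of_pos (by simp [hyxs])]
        rw [List.takeWhile_cons_of_pos (by simp [hyltx]), List.dropWhile_cons_of_pos (by simp [hyltx])]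
        rw [ih xs x hpt hxt hxxs]
        simp
      · rw [List.filter_cons_of_neg (by simp [hyxs, hyx]), List.filter_cons_of_neg (by simp [hyxs])]
        exact ih xs x hpt hxt hxxs

lemma sorted_keys (order : List String) :
    ∀ (xs : List String), xs.Nodup →
      PySem.List.sorted xs (fun k => pvRk order k) =
        ((PySem.List.dedup order).filter (fun k => decide (k ∈ xs)))
          ++ xs.filter (fun k => decide (k ∉ order)) := by
  intro xs
  induction xs using List.reverseRecOn with
  | nil => simp [PySem.List.sorted_eq_foldl_insertBy]
  | append_singleton xs x ih =>
    intro hnd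
    rw [List.nodup_append] at hnd
    obtain ⟨hndxs, -, hdisj⟩ := hnd
    have hxxs : x ∉ xs := by
      intro hx
      exact (hdisj x hx x (List.mem_singleton_self x)) rfl
    rw [PySem.List.sorted_eq_foldl_insertBy, List.foldl_append, List.foldl_cons, List.foldl_nil,
        ← PySem.List.sorted_eq_foldl_insertBy, ih hndxs]
    set F := (PySem.List.dedup order).filter (fun k => decide (k ∈ xs)) with hF
    set G := xs.filter (fun k => decide (k ∉ order)) with hG
    have hFmem : ∀ y ∈ F, y ∈ order ∧ y ∈ xs := by
      intro y hyF
      rw [hF, List.mem_filter] at hyF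
      exact ⟨(PySem.List.mem_dedup order y).mp hyF.1, by simpa using hyF.2⟩
    have hGmem : ∀ y ∈ G, y ∉ order := by
      intro y hyG
      rw [hG, List.mem_filter] at hyG
      simpa using hyG.2
    by_cases hx : x ∈ order
    · have hFp : F.Pairwise (fun a b => pvRk order a < pvRk order b) :=
        (dedup_pairwise_rk order).filter _
      set p : String → Bool := fun k => decide (pvRk order k < pvRk order x) with hpdef
      have hsplit : F = F.takeWhile p ++ F.dropWhile p := (List.takeWhile_append_dropWhile).symm
      have step1 : PySem.List.insertBy (fun a b => decide (pvRk order a < pvRk order b)) x (F ++ G)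
          = F.takeWhile p ++ PySem.List.insertBy (fun a b => decide (pvRk order a < pvRk order b)) x (F.dropWhile p ++ G) := by
        calc PySem.List.insertBy (fun a b => decide (pvRk order a < pvRk order b)) x (F ++ G)
            = PySem.List.insertBy (fun a b => decide (pvRk order a < pvRk order b)) x ((F.takeWhile p ++ F.dropWhile p) ++ G) := by rw [← hsplit]
          _ = PySem.List.insertBy (fun a b => decide (pvRk order a < pvRk order b)) x (F.takeWhile p ++ (F.dropWhile p ++ G)) := by rw [List.append_assoc]
          _ = F.takeWhile p ++ PySem.List.insertBy (fun a b => decide (pvRk order a < pvRk order b)) x (F.dropWhile p ++ G) := by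
              apply insertBy_append_right
              intro y hy
              have := List.mem_takeWhile_imp hy
              rw [hpdef] at this
              simp at this ⊢
              omega
      have step2 : PySem.List.insertBy (fun a b => decide (pvRk order a < pvRk order b)) x (F.dropWhile p ++ G)
          = x :: (F.dropWhile p ++ G) := by
        apply insertBy_eq_cons
        intro y hy
        simp only [decide_eq_true_eq]
        cases hdF : F.dropWhile p with
        | nil =>
          rw [hdF, List.nil_append] at hy
          have hyG : y ∈ G := List.mem_of_mem_head? hy
          have := pvRk_not_mem (hGmem y hyG)
          have := pvRk_lt hx
          omega
        | cons a t =>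
          have hya : y = a := by
            rw [hdF] at hy; simp at hy; exact hy.symm
          subst hya
          have hnp : p y = false := by
            have := List.head?_dropWhile_not p F
            rw [hdF] at this
            simpa using this
          have hyF : y ∈ F := (List.dropWhile_sublist p).mem (by rw [hdF]; simp)
          obtain ⟨hyo, hyxs⟩ := hFmem y hyF
          have hne : y ≠ x := fun h => hxxs (h ▸ hyxs)
          have hnlt : ¬ (pvRk order y < pvRk order x) := by
            rw [hpdef] at hnp; simpa using hnp
          rcases lt_or_eq_of_le (not_lt.mp hnlt) with h | h
          · exact h
          · exact absurd (pvRk_inj hx hyo h) (fun hh => hne hh.symm)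
      rw [step1, step2]
      have hRHS1 : (PySem.List.dedup order).filter (fun k => decide (k ∈ xs ++ [x]))
          = F.takeWhile p ++ x :: F.dropWhile p := by
        rw [hF, hpdef]
        exact filter_insert_mid order _ xs x (dedup_pairwise_rk order)
          ((PySem.List.mem_dedup order x).mpr hx) hxxs
      have hRHS2 : (xs ++ [x]).filter (fun k => decide (k ∉ order)) = G := by
        rw [List.filter_append]
        simp [hx, hG]
      rw [hRHS1, hRHS2]
      simp
    · -- x not in order: appended at the very end
      have hall : ∀ y ∈ F ++ G, (fun a b => decide (pvRk order a < pvRk order b)) x y = false := by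
        intro y hy
        have hle : pvRk order y ≤ (order.length : Int) := pvRk_le order y
        have hxn : pvRk order x = (order.length : Int) := pvRk_not_mem hx
        simp only [decide_eq_false_iff_not, not_lt]
        omega
      rw [PySem.List.insertBy_of_forall_not_before _ _ _ hall]
      have hRHS1 : (PySem.List.dedup order).filter (fun k => decide (k ∈ xs ++ [x])) = F := by
        rw [hF]
        apply List.filter_congr
        intro k hk
        have hko : k ∈ order := (PySem.List.mem_dedup order k).mp hk
        have : k ≠ x := fun h => hx (h ▸ hko)
        simp [this]
      have hRHS2 : (xs ++ [x]).filter (fun k => decide (k ∉ order)) = G ++ [x] := by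
        rw [List.filter_append]
        simp [hx, hG]
      rw [hRHS1, hRHS2]
      simp

lemma contains_mk_mem (data : List (String × String)) (k : String) :
    (PySem.Dict.mk data).contains k = decide (k ∈ data.map Prod.fst) := by
  rw [PySem.Dict.contains_mk]
  by_cases h : k ∈ data.map Prod.fst
  · simp only [h, decide_true]
    obtain ⟨p, hp, hpk⟩ := List.mem_map.mp h
    exact List.any_eq_true.mpr ⟨p, hp, by simp [hpk]⟩
  · have hall : ∀ p ∈ data, (p.1 == k) = false := by
      intro p hp
      rw [beq_eq_false_iff_ne]
      exact fun hpk => h (List.mem_map.mpr ⟨p, hp, hpk⟩)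
    rw [List.any_eq_false.mpr (fun p hp => ne_true_of_eq_false (hall p hp))]
    simp [h]

lemma map_fst_pairfn (l : List String) (g : String → String) :
    (l.map (fun k => (k, g k))).map Prod.fst = l := by
  induction l with
  | nil => rfl
  | cons a t ih => simp only [List.map_cons, ih]

lemma A_first_loop (data : List (String × String)) (order : List String) :
    (order.foldl (fun r key => if (PySem.Dict.mk data).contains key
          then r.insert key ((PySem.Dict.mk data).getD key "") else r)
        (PySem.Dict.empty : PySem.Dict String String)).items =
      ((PySem.List.dedup order).filter (fun k => decide (k ∈ data.map Prod.fst))).map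
        (fun k => (k, (PySem.Dict.mk data).getD k "")) := by
  induction order using List.reverseRecOn with
  | nil => rfl
  | append_singleton ord k ih =>
    rw [List.foldl_append, List.foldl_cons, List.foldl_nil]
    set g : String → String := fun k => (PySem.Dict.mk data).getD k "" with hg
    set R := ord.foldl (fun r key => if (PySem.Dict.mk data).contains key
          then r.insert key (g key) else r) (PySem.Dict.empty : PySem.Dict String String) with hR
    set L := (PySem.List.dedup ord).filter (fun k => decide (k ∈ data.map Prod.fst)) with hL
    have hitems : R.items = L.map (fun k => (k, g k)) := ih
    have hkeys : R.keys = L := by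
      show R.items.map Prod.fst = L
      rw [hitems, map_fst_pairfn]
    have hdedup : PySem.List.dedup (ord ++ [k]) = PySem.Set.add (PySem.List.dedup ord) k := by
      rw [PySem.List.dedup_eq_ofList, PySem.List.dedup_eq_ofList, PySem.Set.ofList_append_singleton]
    by_cases hk : k ∈ data.map Prod.fst
    · rw [contains_mk_mem, if_pos (by simpa using hk)]
      by_cases hko : k ∈ PySem.List.dedup ord
      · have hkL : k ∈ L := by rw [hL, List.mem_filter]; exact ⟨hko, by simpa using hk⟩
        have hcon : R.contains k = true := by
          rw [PySem.Dict.contains_eq_decide_mem_keys, hkeys]; simpa using hkL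
        rw [PySem.Dict.items_insert_of_contains _ _ hcon, hitems, List.map_map]
        have : ((fun p => if (p.1 == k) = true then (k, g k) else p) ∘ fun k' => (k', g k'))
            = fun k' => (k', g k') := by
          funext k'
          by_cases h : k' = k
          · subst h; simp
          · simp [h]
        rw [this, hdedup, PySem.Set.add_eq_ite, if_pos hko, hL]
      · have hkL : k ∉ L := fun h => hko (List.mem_of_mem_filter h)
        have hcon : R.contains k = false := by
          rw [PySem.Dict.contains_eq_decide_mem_keys, hkeys]; simpa using hkL
        rw [PySem.Dict.items_insert_of_not_contains _ _ hcon, hitems,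
            hdedup, PySem.Set.add_eq_ite, if_neg hko, List.filter_append]
        rw [List.filter_cons_of_pos (by simpa using hk)]
        simp [hL, PySem.List.dedup_eq_ofList]
        intro a _ x _
        rw [hg]
    · rw [contains_mk_mem, if_neg (by simpa using hk)]
      rw [hitems, hdedup, PySem.Set.add_eq_ite]
      by_cases hko : k ∈ PySem.List.dedup ord
      · rw [if_pos hko, hL]
      · rw [if_neg hko, List.filter_append, List.filter_cons_of_neg (by simpa using hk)]
        simp [hL, PySem.List.dedup_eq_ofList]
        intro a _ x _
        rw [hg]

lemma A_second_loop :
    ∀ (ds : List (String × String)) (r : PySem.Dict String String),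
      (ds.map Prod.fst).Nodup →
      (ds.foldl (fun r kv => if r.contains kv.1 then r else r.insert kv.1 kv.2) r).items =
        r.items ++ ds.filter (fun kv => !(r.contains kv.1)) := by
  intro ds
  induction ds with
  | nil => intro r _; simp
  | cons kv t ih =>
    intro r hnd
    simp only [List.map_cons, List.nodup_cons] at hnd
    obtain ⟨hk, hnd⟩ := hnd
    simp only [List.foldl_cons, List.filter_cons]
    by_cases hc : r.contains kv.1
    · rw [if_pos hc, ih r hnd]
      simp [hc]
    · have hcf : r.contains kv.1 = false := eq_false_of_ne_true hc
      rw [if_neg hc, ih _ hnd, PySem.Dict.items_insert_of_not_contains _ _ hcf]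
      have hfc : t.filter (fun p => !((r.insert kv.1 kv.2).contains p.1)) =
          t.filter (fun p => !(r.contains p.1)) := by
        apply List.filter_congr
        intro p hp
        rw [PySem.Dict.contains_insert]
        have hne : p.1 ≠ kv.1 := fun h => hk (by rw [← h]; exact List.mem_map_of_mem hp)
        simp [hne]
      rw [hfc]
      simp [hcf]

lemma pv_main_eq (data : List (String × String)) (order : List String)
    (hpre : (data.map Prod.fst).Nodup) :
    reorder_by_profile_py data order = reorder_by_profile_py_alt data order := by
  unfold reorder_by_profile_py reorder_by_profile_py_alt
  simp only []
  set g : String → String := fun k => (PySem.Dict.mk data).getD k "" with hg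
  -- A side
  rw [A_second_loop data _ hpre, A_first_loop data order]
  -- B side
  have hkeyfun : (fun k => ((PySem.List.enumerate order).foldl
        (fun p iv => p.setdefault iv.2 iv.1) (PySem.Dict.empty : PySem.Dict String Int)).getD k
        (order.length : Int)) = fun k => pvRk order k := funext (getD_pos order)
  rw [hkeyfun, sorted_keys order _ hpre]
  set F := (PySem.List.dedup order).filter (fun k => decide (k ∈ data.map Prod.fst)) with hF
  set G := (data.map Prod.fst).filter (fun k => decide (k ∉ order)) with hG
  have hndFG : (F ++ G).Nodup := by
    have hperm : (PySem.List.sorted (data.map Prod.fst) (fun k => pvRk order k)).Perm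
        (data.map Prod.fst) := PySem.List.sorted_perm _ _ _
    rw [sorted_keys order _ hpre] at hperm
    rw [hF, hG]
    exact hperm.nodup_iff.mpr hpre
  have hfresh : ((F ++ G).foldl (fun out k => out.insert k (g k))
      (PySem.Dict.empty : PySem.Dict String String)).items = (F ++ G).map (fun k => (k, g k)) := by
    have h := PySem.Dict.items_foldl_insert_fresh (F ++ G) (fun k => k) g
        (PySem.Dict.empty : PySem.Dict String String)
        (fun a _ => by simp [PySem.Dict.contains_empty])
        (by simpa using hndFG)
    simpa using h
  rw [hfresh, List.map_append]
  congr 1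
  -- remaining: second-loop tail equals G mapped
  set R := order.foldl (fun r key => if (PySem.Dict.mk data).contains key
        then r.insert key (g key) else r) (PySem.Dict.empty : PySem.Dict String String) with hRdef
  have hRitems : R.items = F.map (fun k => (k, g k)) := A_first_loop data order
  have hRkeys : R.keys = F := by
    show R.items.map Prod.fst = F
    rw [hRitems, map_fst_pairfn]
  have hfc : data.filter (fun kv => !(R.contains kv.1)) =
      data.filter (fun kv => decide (kv.1 ∉ order)) := by
    apply List.filter_congr
    intro kv hkv
    rw [PySem.Dict.contains_eq_decide_mem_keys, hRkeys]
    have hkdk : kv.1 ∈ data.map Prod.fst := List.mem_map_of_mem hkv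
    by_cases ho : kv.1 ∈ order
    · have : kv.1 ∈ F := by
        rw [hF, List.mem_filter]
        exact ⟨(PySem.List.mem_dedup order kv.1).mpr ho, by simpa using hkdk⟩
      simp [this, ho]
    · have : kv.1 ∉ F := by
        rw [hF, List.mem_filter]
        rintro ⟨hmem, -⟩
        exact ho ((PySem.List.mem_dedup order kv.1).mp hmem)
      simp [this, ho]
  rw [hfc]
  have hGm : G = (data.filter (fun kv => decide (kv.1 ∉ order))).map Prod.fst := by
    rw [hG, List.filter_map]
    rfl
  rw [hGm, List.map_map]
  have : ∀ kv ∈ data.filter (fun kv => decide (kv.1 ∉ order)),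
      ((fun k => (k, g k)) ∘ Prod.fst) kv = kv := by
    intro kv hkv
    have hkvd : kv ∈ data := List.mem_of_mem_filter hkv
    have hval : g kv.1 = kv.2 := by
      rw [hg]
      exact PySem.Dict.getD_of_mem_items (PySem.Dict.mk data)
        (by show (kv.1, kv.2) ∈ data; simpa using hkvd) (by simpa using hpre) ""
    show (kv.1, g kv.1) = kv
    rw [hval]
  rw [List.map_congr_left this]
  simp

-- ===== VERDICT (by name: the statement is the Claim_ definition above) =====
theorem reorder_by_profile_py_spec : Claim_equal_reorder_by_profile_py := by
  intro data order _ hpre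
  unfold Spec_reorder_by_profile_py
  exact pv_main_eq data order hpre
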